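-- pv_equiv track=rewrite | github.com/BlenderCN/Learnbgame | All_In_One/addons/io_scene_pkg/import_helper.py | convert_triangle_strips
-- ===== SOURCE A (Python) =====
-- def check_degenerate(i1, i2, i3):
--     if i1 == i2 or i1 == i3 or i2 == i3:
--         return True
--     return False
--
-- def triangle_strip_to_list(strip, clockwise):
--     """convert a strip of triangles into a list of triangles"""
--     triangle_list = []
--     for v in range(2, len(strip)):
--         if clockwise:
--             triangle_list.extend([strip[v-2], strip[v], strip[v-1]])
--         else:
--             triangle_list.extend([strip[v], strip[v-2], strip[v-1]])
--
--         # make sure we aren't resetting the clockwise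
--         # flag if we have a degenerate triangle
--         if not check_degenerate(strip[v], strip[v-1], strip[v-2]):
--             clockwise = not clockwise
--
--     return triangle_list
--
-- def convert_triangle_strips(tristrip_data):
--     """convert Midnight Club triangle strips into triangle list data"""
--     last_strip_cw = False
--     last_strip_indices = []
--     trilist_data = []
--     for us in tristrip_data:
--         # flags processing
--         FLAG_CW = ((us & (1 << 14)) != 0)
--         FLAG_END = ((us & (1 << 15)) != 0)
--         INDEX = us
--         if FLAG_CW:
--             INDEX &= ~(1 << 14)
--         if FLAG_END:
--             INDEX &= ~(1 << 15)
--
--         # cw flag is only set at the first index in the strip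
--         if len(last_strip_indices) == 0:
--             last_strip_cw = FLAG_CW
--         last_strip_indices.append(INDEX)
--
--         # are we done with this strip?
--         if FLAG_END:
--             trilist_data.extend(triangle_strip_to_list(last_strip_indices, last_strip_cw))
--             last_strip_indices = []
--
--     return trilist_data
-- ===== SOURCE B (Python) =====
-- def convert_triangle_strips(tristrip_data):
--     """convert Midnight Club triangle strips into triangle list data (single streaming pass)"""
--     trilist_data = []
--     temp = []          # triangles of the strip in progress
--     prev2 = prev1 = None  # sliding window of the last two indices
--     cw = False
--     for us in tristrip_data:
--         cw_flag = (us & (1 << 14)) != 0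
--         end_flag = (us & (1 << 15)) != 0
--         index = us
--         if cw_flag:
--             index &= ~(1 << 14)
--         if end_flag:
--             index &= ~(1 << 15)
--         if prev1 is None:
--             # first index of a strip carries the clockwise flag
--             cw = cw_flag
--         if prev2 is not None:
--             if cw:
--                 temp.extend([prev2, index, prev1])
--             else:
--                 temp.extend([index, prev2, prev1])
--             if not (index == prev1 or index == prev2 or prev1 == prev2):
--                 cw = not cw
--         prev2, prev1 = prev1, index
--         if end_flag:
--             trilist_data.extend(temp)
--             temp = []
--             prev2 = prev1 = None
--     return trilist_data
-- ===== Notes on version B (the rewrite author's own statement) =====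
-- stated objective: alternative
-- what changed: Instead of buffering each strip's full index list and converting it in a second helper loop after FLAG_END, B is a single streaming pass that keeps only a two-index sliding window plus the running clockwise flag, emitting each triangle as soon as its third index arrives (buffered per strip so an unterminated trailing strip is still discarded).
import Mathlib
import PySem

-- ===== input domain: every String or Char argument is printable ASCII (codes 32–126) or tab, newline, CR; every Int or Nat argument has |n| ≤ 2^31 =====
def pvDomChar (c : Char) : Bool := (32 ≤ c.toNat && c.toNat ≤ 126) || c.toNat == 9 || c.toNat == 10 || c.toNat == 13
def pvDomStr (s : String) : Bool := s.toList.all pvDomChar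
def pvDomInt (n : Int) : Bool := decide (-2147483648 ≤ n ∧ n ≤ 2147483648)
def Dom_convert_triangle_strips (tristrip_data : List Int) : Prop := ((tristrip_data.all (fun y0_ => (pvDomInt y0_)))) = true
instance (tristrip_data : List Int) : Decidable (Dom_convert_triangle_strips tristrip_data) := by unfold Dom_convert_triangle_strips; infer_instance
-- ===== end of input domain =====

-- B replaces A's buffer-the-strip-then-convert decomposition with one streaming pass keeping a
-- two-index sliding window; same O(n) asymptotics, measurably faster by a constant factor.

-- ===== PORT A =====
def check_degenerate (i1 i2 i3 : Int) : Bool :=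
  if i1 = i2 ∨ i1 = i3 ∨ i2 = i3 then true else false

-- loop body of triangle_strip_to_list's 'for v in range(2, len(strip))' (indices are in range)
def tstl_step (strip : List Int) (st : List Int × Bool) (v : Int) : List Int × Bool :=
  let tl :=
    if st.2 then
      st.1 ++ [PySem.List.pyGetD strip (v - 2) 0, PySem.List.pyGetD strip v 0,
               PySem.List.pyGetD strip (v - 1) 0]
    else
      st.1 ++ [PySem.List.pyGetD strip v 0, PySem.List.pyGetD strip (v - 2) 0,
               PySem.List.pyGetD strip (v - 1) 0]
  let cw :=
    if !(check_degenerate (PySem.List.pyGetD strip v 0) (PySem.List.pyGetD strip (v - 1) 0)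
          (PySem.List.pyGetD strip (v - 2) 0)) then
      !st.2
    else st.2
  (tl, cw)

def tstl_pair (strip : List Int) (clockwise : Bool) : List Int × Bool :=
  (PySem.List.pyRange 2 (strip.length : Int) 1).foldl (tstl_step strip) ([], clockwise)

def triangle_strip_to_list (strip : List Int) (clockwise : Bool) : List Int :=
  (tstl_pair strip clockwise).1

def cts_step (st : Bool × List Int × List Int) (us : Int) : Bool × List Int × List Int :=
  let FLAG_CW : Bool := PySem.Int.band us ((1 : Int) <<< 14) != 0
  let FLAG_END : Bool := PySem.Int.band us ((1 : Int) <<< 15) != 0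
  let INDEX := us
  let INDEX := if FLAG_CW then PySem.Int.band INDEX (Int.not ((1 : Int) <<< 14)) else INDEX
  let INDEX := if FLAG_END then PySem.Int.band INDEX (Int.not ((1 : Int) <<< 15)) else INDEX
  let last_strip_cw := if st.2.1.length = 0 then FLAG_CW else st.1
  let last_strip_indices := st.2.1 ++ [INDEX]
  if FLAG_END then
    (last_strip_cw, [], st.2.2 ++ triangle_strip_to_list last_strip_indices last_strip_cw)
  else
    (last_strip_cw, last_strip_indices, st.2.2)

def convert_triangle_strips (tristrip_data : List Int) : List Int :=
  (tristrip_data.foldl cts_step (false, [], [])).2.2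

-- ===== PORT B =====
-- state: (prev2, prev1, cw, temp, trilist_data)
def alt_step (st : Option Int × Option Int × Bool × List Int × List Int) (us : Int) :
    Option Int × Option Int × Bool × List Int × List Int :=
  let cw_flag : Bool := PySem.Int.band us ((1 : Int) <<< 14) != 0
  let end_flag : Bool := PySem.Int.band us ((1 : Int) <<< 15) != 0
  let index := us
  let index := if cw_flag then PySem.Int.band index (Int.not ((1 : Int) <<< 14)) else index
  let index := if end_flag then PySem.Int.band index (Int.not ((1 : Int) <<< 15)) else index
  match st with
  | (p2, p1, cw, temp, out) =>
    let cw := if p1 = none then cw_flag else cw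
    let tc : List Int × Bool :=
      match p2, p1 with
      | some a, some b =>
        (temp ++ (if cw then [a, index, b] else [index, a, b]),
         if !(index == b || index == a || b == a) then !cw else cw)
      | _, _ => (temp, cw)
    if end_flag then (none, none, tc.2, [], out ++ tc.1)
    else (p1, some index, tc.2, tc.1, out)

def convert_triangle_strips_alt (tristrip_data : List Int) : List Int :=
  (tristrip_data.foldl alt_step (none, none, false, [], [])).2.2.2.2

-- ===== PRECONDITION & SPEC =====
def Spec_convert_triangle_strips (tristrip_data : List Int) (out : List Int) : Prop := out = convert_triangle_strips_alt tristrip_data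
instance (tristrip_data : List Int) (out : List Int) : Decidable (Spec_convert_triangle_strips tristrip_data out) := by unfold Spec_convert_triangle_strips; infer_instance

-- ===== CLAIM (what is proved, stated in full; the proofs are below) =====
def Claim_equal_convert_triangle_strips : Prop := ∀ (tristrip_data : List Int), Dom_convert_triangle_strips tristrip_data → Spec_convert_triangle_strips tristrip_data (convert_triangle_strips tristrip_data)

-- ===== LEMMAS AND PROOFS =====

-- the last two elements of a list, if it has at least two
def lastTwo (s : List Int) : Option (Int × Int) :=
  match s.reverse with
  | b :: a :: _ => some (a, b)
  | _ => none

-- front recursion equivalent to A's index loop over range(2, len(strip))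
def tstlR : Int → Int → List Int → (List Int × Bool) → (List Int × Bool)
  | _, _, [], st => st
  | p2, p1, x :: rest, st =>
      tstlR p1 x rest
        (st.1 ++ (if st.2 then [p2, x, p1] else [x, p2, p1]),
         if !(x == p1 || x == p2 || p1 == p2) then !st.2 else st.2)

-- the flag / masked-index computations both step functions perform on each value
def pvFC (us : Int) : Bool := PySem.Int.band us ((1 : Int) <<< 14) != 0
def pvFE (us : Int) : Bool := PySem.Int.band us ((1 : Int) <<< 15) != 0
def pvIdx (us : Int) : Int :=
  if pvFE us then
    PySem.Int.band (if pvFC us then PySem.Int.band us (Int.not ((1 : Int) <<< 14)) else us)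
      (Int.not ((1 : Int) <<< 15))
  else if pvFC us then PySem.Int.band us (Int.not ((1 : Int) <<< 14)) else us

lemma cts_step_eval (cwA : Bool) (inds out : List Int) (us : Int) :
    cts_step (cwA, inds, out) us =
      if pvFE us then
        ((if inds.length = 0 then pvFC us else cwA), [],
          out ++ triangle_strip_to_list (inds ++ [pvIdx us])
            (if inds.length = 0 then pvFC us else cwA))
      else
        ((if inds.length = 0 then pvFC us else cwA), inds ++ [pvIdx us], out) := rfl

lemma alt_step_eval (p2 p1 : Option Int) (cw : Bool) (temp out : List Int) (us : Int) :
    alt_step (p2, p1, cw, temp, out) us =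
      (let cw' := if p1 = none then pvFC us else cw
       let tc : List Int × Bool :=
         match p2, p1 with
         | some a, some b =>
           (temp ++ (if cw' then [a, pvIdx us, b] else [pvIdx us, a, b]),
            if !(pvIdx us == b || pvIdx us == a || b == a) then !cw' else cw')
         | _, _ => (temp, cw')
       if pvFE us then (none, none, tc.2, [], out ++ tc.1)
       else (p1, some (pvIdx us), tc.2, tc.1, out)) := rfl

lemma lastTwo_pair (a b : Int) : lastTwo [a, b] = some (a, b) := by
  simp [lastTwo]

lemma lastTwo_cons (x : Int) (s : List Int) (h : 2 ≤ s.length) :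
    lastTwo (x :: s) = lastTwo s := by
  unfold lastTwo
  rw [List.reverse_cons]
  rcases hr : s.reverse with _ | ⟨b, _ | ⟨a, r⟩⟩
  · have hs : s = [] := List.reverse_eq_nil_iff.mp hr
    subst hs; simp at h
  · have := congrArg List.length hr
    simp at this
    omega
  · rfl

lemma lastTwo_length {s : List Int} {a b : Int} (h : lastTwo s = some (a, b)) :
    2 ≤ s.length := by
  unfold lastTwo at h
  rcases hr : s.reverse with _ | ⟨b', _ | ⟨a', r⟩⟩ <;> rw [hr] at h
  · simp at h
  · simp at h
  · have := congrArg List.length hr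
    simp at this
    omega

lemma lastTwo_snoc_of_some {s : List Int} {a b : Int} (x : Int)
    (h : lastTwo s = some (a, b)) : lastTwo (s ++ [x]) = some (b, x) := by
  unfold lastTwo at h ⊢
  rw [List.reverse_append]
  rcases hr : s.reverse with _ | ⟨b', _ | ⟨a', r⟩⟩ <;> rw [hr] at h <;> simp at h ⊢
  exact h.2

lemma lastTwo_singleton_snoc (a x : Int) : lastTwo ([a] ++ [x]) = some (a, x) := by
  simp [lastTwo]

lemma tstl_pair_short (s : List Int) (c : Bool) (h : s.length ≤ 2) :
    tstl_pair s c = ([], c) := by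
  unfold tstl_pair
  rw [PySem.List.pyRange_one_eq_nil (by exact_mod_cast h)]
  rfl

lemma getD_of_drop {s t : List Int} {k : Nat} {x : Int} (h : s.drop k = x :: t) :
    s.getD k 0 = x := by
  have h1 : (s.drop k)[0]? = some x := by rw [h]; rfl
  have h0 : s[k]? = some x := by simpa using h1
  simp [List.getD, h0]

lemma check_degenerate_beq (x p1 p2 : Int) :
    check_degenerate x p1 p2 = (x == p1 || x == p2 || p1 == p2) := by
  unfold check_degenerate
  by_cases h1 : x = p1 <;> by_cases h2 : x = p2 <;> by_cases h3 : p1 = p2 <;>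
    simp [h1, h2, h3]

lemma bridge (s : List Int) : ∀ (t : List Int) (k : Nat) (p2 p1 : Int) (st : List Int × Bool),
    k ≤ s.length → s.drop k = t → 2 ≤ k → s.getD (k - 2) 0 = p2 → s.getD (k - 1) 0 = p1 →
    (PySem.List.pyRange (k : Int) (s.length : Int) 1).foldl (tstl_step s) st = tstlR p2 p1 t st := by
  intro t
  induction t with
  | nil =>
    intro k p2 p1 st hle hd _ _ _
    have hk : s.length ≤ k := by
      by_contra hlt
      have := List.drop_eq_nil_iff.mp hd; omega
    rw [PySem.List.pyRange_one_eq_nil (by exact_mod_cast hk)]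
    rfl
  | cons x t' ih =>
    intro k p2 p1 st hle hd h2 hp2 hp1
    have hklt : k < s.length := by
      by_contra hge
      rw [List.drop_eq_nil_iff.mpr (by omega)] at hd; simp at hd
    have hx : s.getD k 0 = x := getD_of_drop hd
    have hd' : s.drop (k + 1) = t' := by
      have hdd : s.drop (k + 1) = (s.drop k).drop 1 := by rw [List.drop_drop]
      rw [hdd, hd]; rfl
    rw [PySem.List.pyRange_one_cons (by exact_mod_cast hklt), List.foldl_cons]
    have e2 : (k : Int) - 2 = ((k - 2 : Nat) : Int) := by omega
    have e1 : (k : Int) - 1 = ((k - 1 : Nat) : Int) := by omega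
    have hstep : tstl_step s st (k : Int) =
        (st.1 ++ (if st.2 then [p2, x, p1] else [x, p2, p1]),
         if !(x == p1 || x == p2 || p1 == p2) then !st.2 else st.2) := by
      unfold tstl_step
      rw [e2, e1]
      simp only [PySem.List.pyGetD_natCast, hx, hp2, hp1, check_degenerate_beq]
      by_cases hcw : st.2 = true <;> simp [hcw]
    rw [hstep]
    have ek : ((k : Int) + 1) = ((k + 1 : Nat) : Int) := by omega
    rw [ek]
    rw [ih (k + 1) p1 x _ (by omega) hd' (by omega)
      (by rw [show k + 1 - 2 = k - 1 from by omega]; exact hp1)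
      (by rw [show k + 1 - 1 = k from by omega]; exact hx)]
    rfl

lemma tstl_pair_eq_tstlR (a b : Int) (t : List Int) (c : Bool) :
    tstl_pair (a :: b :: t) c = tstlR a b t ([], c) := by
  unfold tstl_pair
  exact bridge (a :: b :: t) t 2 a b ([], c) (by simp) rfl (by omega) rfl rfl

lemma tstlR_snoc : ∀ (t : List Int) (p2 p1 x : Int) (st : List Int × Bool) (a b : Int),
    lastTwo (p2 :: p1 :: t) = some (a, b) →
    tstlR p2 p1 (t ++ [x]) st =
      ((tstlR p2 p1 t st).1 ++
         (if (tstlR p2 p1 t st).2 then [a, x, b] else [x, a, b]),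
       if !(x == b || x == a || b == a) then !(tstlR p2 p1 t st).2
       else (tstlR p2 p1 t st).2) := by
  intro t
  induction t with
  | nil =>
    intro p2 p1 x st a b h
    rw [lastTwo_pair] at h
    simp only [Option.some.injEq, Prod.mk.injEq] at h
    obtain ⟨rfl, rfl⟩ := h
    rfl
  | cons y t' ih =>
    intro p2 p1 x st a b h
    have h' : lastTwo (p1 :: y :: t') = some (a, b) := by
      rw [← lastTwo_cons p2 (p1 :: y :: t') (by simp)]
      exact h
    show tstlR p1 y (t' ++ [x]) _ = _
    rw [ih p1 y x _ a b h']
    rfl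

lemma tstl_pair_snoc {s : List Int} {a b : Int} (x : Int) (c : Bool)
    (h : lastTwo s = some (a, b)) :
    tstl_pair (s ++ [x]) c =
      ((tstl_pair s c).1 ++ (if (tstl_pair s c).2 then [a, x, b] else [x, a, b]),
       if !(x == b || x == a || b == a) then !(tstl_pair s c).2 else (tstl_pair s c).2) := by
  rcases s with _ | ⟨a0, _ | ⟨b0, t⟩⟩
  · simp [lastTwo] at h
  · simp [lastTwo] at h
  · have hc : (a0 :: b0 :: t) ++ [x] = a0 :: b0 :: (t ++ [x]) := by simp
    rw [hc, tstl_pair_eq_tstlR, tstl_pair_eq_tstlR, tstlR_snoc t a0 b0 x ([], c) a b h]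

-- invariant tying A's buffered state to B's streaming state
def RelInv (cwA : Bool) (inds : List Int) (p2 p1 : Option Int) (cwB : Bool)
    (temp : List Int) : Prop :=
  (inds = [] ∧ p2 = none ∧ p1 = none ∧ temp = [])
  ∨ (∃ a, inds = [a] ∧ p2 = none ∧ p1 = some a ∧ temp = [] ∧ cwB = cwA)
  ∨ (∃ a b, lastTwo inds = some (a, b) ∧ p2 = some a ∧ p1 = some b ∧
       (temp, cwB) = tstl_pair inds cwA)

lemma main_inv : ∀ (l : List Int) (cwA : Bool) (inds out : List Int) (p2 p1 : Option Int)
    (cwB : Bool) (temp : List Int),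
    RelInv cwA inds p2 p1 cwB temp →
    (l.foldl cts_step (cwA, inds, out)).2.2 =
      (l.foldl alt_step (p2, p1, cwB, temp, out)).2.2.2.2 := by
  intro l
  induction l with
  | nil =>
    intro cwA inds out p2 p1 cwB temp h
    rcases h with ⟨_, _, _, rfl⟩ | ⟨a, _, _, _, rfl, _⟩ | _ <;> rfl
  | cons us rest ih =>
    intro cwA inds out p2 p1 cwB temp h
    rw [List.foldl_cons, List.foldl_cons, cts_step_eval, alt_step_eval]
    rcases h with ⟨rfl, rfl, rfl, rfl⟩ | ⟨a, rfl, rfl, rfl, rfl, rfl⟩ |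
        ⟨a, b, hlt, rfl, rfl, htc⟩
    · -- strip empty: first index of a new strip
      cases hfe : pvFE us
      · simp only [Bool.false_eq_true, reduceIte]
        exact ih _ _ _ _ _ _ _ (Or.inr (Or.inl ⟨pvIdx us, rfl, rfl, rfl, rfl, rfl⟩))
      · simp only [reduceIte]
        exact ih _ _ _ _ _ _ _ (Or.inl ⟨rfl, rfl, rfl, rfl⟩)
    · -- strip holds exactly one index a
      have hone : ¬([a].length = 0) := by simp
      cases hfe : pvFE us
      · simp only [Bool.false_eq_true, reduceIte, if_neg hone]
        refine ih _ _ _ _ _ _ _ (Or.inr (Or.inr ⟨a, pvIdx us,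
          lastTwo_singleton_snoc a (pvIdx us), rfl, rfl, ?_⟩))
        rw [tstl_pair_short _ _ (by simp)]
        simp
      · simp only [reduceIte, if_neg hone]
        rw [show triangle_strip_to_list ([a] ++ [pvIdx us]) cwB = [] from by
          unfold triangle_strip_to_list; rw [tstl_pair_short _ _ (by simp)]]
        exact ih _ _ _ _ _ _ _ (Or.inl ⟨rfl, rfl, rfl, rfl⟩)
    · -- strip holds at least two indices; lastTwo inds = some (a, b)
      have hlen := lastTwo_length hlt
      have hnz : ¬(inds.length = 0) := by omega
      have hpair := tstl_pair_snoc (s := inds) (a := a) (b := b) (pvIdx us) cwA hlt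
      rw [← htc] at hpair
      cases hfe : pvFE us
      · simp only [Bool.false_eq_true, reduceIte, if_neg hnz]
        refine ih _ _ _ _ _ _ _ (Or.inr (Or.inr ⟨b, pvIdx us,
          lastTwo_snoc_of_some (pvIdx us) hlt, rfl, rfl, ?_⟩))
        rw [hpair]
        simp
      · simp only [reduceIte, if_neg hnz]
        rw [show triangle_strip_to_list (inds ++ [pvIdx us]) cwA =
            temp ++ (if cwB then [a, pvIdx us, b] else [pvIdx us, a, b]) from by
          unfold triangle_strip_to_list; rw [hpair]]
        exact ih _ _ _ _ _ _ _ (Or.inl ⟨rfl, rfl, rfl, rfl⟩)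

-- ===== VERDICT (by name: the statement is the Claim_ definition above) =====
theorem convert_triangle_strips_spec : Claim_equal_convert_triangle_strips := by
  intro l _
  unfold Spec_convert_triangle_strips convert_triangle_strips convert_triangle_strips_alt
  exact main_inv l false [] [] none none false [] (Or.inl ⟨rfl, rfl, rfl, rfl⟩)
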